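-- pv_equiv track=rewrite | github.com/liuxiao1468/CSE-572-Data-Mining | proj_3/train.py | try_model_dbscan
-- ===== SOURCE A (Python) =====
-- def try_model_dbscan(label,feature_m1,label_class,idx_keep,bin_truth):
--     cluster = []
--     bin_cluster = []
--     bin_index = []
--     result = []
--     bin_1 = []
--     bin_2 = []
--     bin_3 = []
--     bin_4 = []
--     bin_5 = []
--     bin_6 = []
--     bin_1_idx = []
--     bin_2_idx = []
--     bin_3_idx = []
--     bin_4_idx = []
--     bin_5_idx = []
--     bin_6_idx = []
--     idx_save = []
--     for j in range (len(label_class)):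
--         cluster_j = [ i for i in range(len(label)) if label[i] == label_class[j] ]
--         idx_save_j = [idx_keep[i] for i in cluster_j]
--
--         cluster.append(cluster_j)
--         idx_save.append(idx_save_j)
--     for j in range (len(label_class)):
--         result_label = [bin_truth[i] for i in cluster[j]]
--         result.append(max(set(result_label), key=result_label.count))
--     for k in range (len(label_class)):
--         if result[k]==1:
--             bin_1 = bin_1 + cluster[k]
--             bin_1_idx = bin_1_idx + idx_save[k]
--         elif result[k]==2:
--             bin_2 = bin_2 + cluster[k]
--             bin_2_idx = bin_2_idx + idx_save[k]
--         elif result[k]==3: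
--             bin_3 = bin_3 + cluster[k]
--             bin_3_idx = bin_3_idx + idx_save[k]
--         elif result[k]==4:
--             bin_4 = bin_4 + cluster[k]
--             bin_4_idx = bin_4_idx + idx_save[k]
--         elif result[k]==5:
--             bin_5 = bin_5 + cluster[k]
--             bin_5_idx = bin_5_idx + idx_save[k]
--         elif result[k]==6:
--             bin_6 = bin_6 + cluster[k]
--             bin_6_idx = bin_6_idx + idx_save[k]
--     bin_cluster.append(bin_1)
--     bin_cluster.append(bin_2)
--     bin_cluster.append(bin_3)
--     bin_cluster.append(bin_4)
--     bin_cluster.append(bin_5)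
--     bin_cluster.append(bin_6)
--     bin_index.append(bin_1_idx)
--     bin_index.append(bin_2_idx)
--     bin_index.append(bin_3_idx)
--     bin_index.append(bin_4_idx)
--     bin_index.append(bin_5_idx)
--     bin_index.append(bin_6_idx)
--     return bin_cluster, bin_index
-- ===== SOURCE B (Python) =====
-- def try_model_dbscan(label, feature_m1, label_class, idx_keep, bin_truth):
--     # One pass groups label-value -> list of indices; per class a count table
--     # gives the majority truth label; bins indexed arithmetically (no elif chain).
--     groups = {}
--     for i, v in enumerate(label):
--         groups.setdefault(v, []).append(i)
--     bins = [[] for _ in range(6)]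
--     bins_idx = [[] for _ in range(6)]
--     for c in label_class:
--         idxs = groups.get(c, [])
--         counts = {}
--         for i in idxs:
--             t = bin_truth[i]
--             counts[t] = counts.get(t, 0) + 1
--         best = max(counts, key=counts.get)
--         if 1 <= best <= 6:
--             bins[best - 1].extend(idxs)
--             bins_idx[best - 1].extend(idx_keep[i] for i in idxs)
--     return bins, bins_idx
-- ===== Notes on version B (the rewrite author's own statement) =====
-- stated objective: faster
-- what changed: B replaces A's per-class rescan of the whole label list and the quadratic list.count-based majority vote by a single-pass dict grouping of indices plus a per-cluster count table, and replaces the six-way elif chain by arithmetic indexing into a list of six bins.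
import Mathlib
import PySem

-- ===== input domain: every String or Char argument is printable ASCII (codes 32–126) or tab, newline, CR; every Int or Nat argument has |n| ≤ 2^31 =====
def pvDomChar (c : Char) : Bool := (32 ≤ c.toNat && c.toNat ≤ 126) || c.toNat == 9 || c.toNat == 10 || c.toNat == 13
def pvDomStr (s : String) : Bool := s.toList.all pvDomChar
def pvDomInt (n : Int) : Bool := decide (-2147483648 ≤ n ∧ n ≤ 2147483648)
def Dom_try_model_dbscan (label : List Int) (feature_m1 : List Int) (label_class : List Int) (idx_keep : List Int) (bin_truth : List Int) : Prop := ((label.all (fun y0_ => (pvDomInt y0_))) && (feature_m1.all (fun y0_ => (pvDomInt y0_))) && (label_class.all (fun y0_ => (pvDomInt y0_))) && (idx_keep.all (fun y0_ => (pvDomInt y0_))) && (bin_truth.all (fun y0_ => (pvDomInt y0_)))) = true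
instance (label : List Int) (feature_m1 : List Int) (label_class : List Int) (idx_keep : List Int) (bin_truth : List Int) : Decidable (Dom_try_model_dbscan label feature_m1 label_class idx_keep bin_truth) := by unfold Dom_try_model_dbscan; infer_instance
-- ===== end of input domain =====

-- B replaces A's per-class rescans and list.count majority vote by one-pass dict grouping
-- plus per-cluster count tables, and the six-way elif chain by arithmetic bin indexing (faster).

-- ===== PORT A =====
def try_model_dbscan (label : List Int) (feature_m1 : List Int) (label_class : List Int) (idx_keep : List Int) (bin_truth : List Int) : List (List Int) × List (List Int) :=
  let n : Int := (label.length : Int)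
  let m : Int := (label_class.length : Int)
  -- first loop: cluster and idx_save, appended per class
  let cs := (PySem.List.pyRange 0 m 1).foldl
    (fun (st : List (List Int) × List (List Int)) j =>
      let cluster_j := (PySem.List.pyRange 0 n 1).filter
        (fun i => PySem.List.pyGetD label i 0 == PySem.List.pyGetD label_class j 0)
      let idx_save_j := cluster_j.map (fun i => PySem.List.pyGetD idx_keep i 0)
      (st.1 ++ [cluster_j], st.2 ++ [idx_save_j]))
    ([], [])
  -- second loop: result[j] = max(set(result_label), key=result_label.count)
  -- (Python's set iteration order is hash order; Pre_ excludes ties, so the choice below agrees)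
  let result := (PySem.List.pyRange 0 m 1).foldl
    (fun (r : List Int) j =>
      let result_label := (PySem.List.pyGetD cs.1 j []).map (fun i => PySem.List.pyGetD bin_truth i 0)
      r ++ [(PySem.List.max? (PySem.Set.ofList result_label) (fun v => (result_label.count v : Int))).getD 0])
    []
  -- third loop: six-way elif chain accumulating six bins and six index bins
  let fin := (PySem.List.pyRange 0 m 1).foldl
    (fun (st : (List Int × List Int × List Int × List Int × List Int × List Int) ×
               (List Int × List Int × List Int × List Int × List Int × List Int)) k =>
      let b := st.1
      let bi := st.2
      let rk := PySem.List.pyGetD result k 0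
      let ck := PySem.List.pyGetD cs.1 k []
      let sk := PySem.List.pyGetD cs.2 k []
      if rk = 1 then ((b.1 ++ ck, b.2.1, b.2.2.1, b.2.2.2.1, b.2.2.2.2.1, b.2.2.2.2.2),
                      (bi.1 ++ sk, bi.2.1, bi.2.2.1, bi.2.2.2.1, bi.2.2.2.2.1, bi.2.2.2.2.2))
      else if rk = 2 then ((b.1, b.2.1 ++ ck, b.2.2.1, b.2.2.2.1, b.2.2.2.2.1, b.2.2.2.2.2),
                      (bi.1, bi.2.1 ++ sk, bi.2.2.1, bi.2.2.2.1, bi.2.2.2.2.1, bi.2.2.2.2.2))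
      else if rk = 3 then ((b.1, b.2.1, b.2.2.1 ++ ck, b.2.2.2.1, b.2.2.2.2.1, b.2.2.2.2.2),
                      (bi.1, bi.2.1, bi.2.2.1 ++ sk, bi.2.2.2.1, bi.2.2.2.2.1, bi.2.2.2.2.2))
      else if rk = 4 then ((b.1, b.2.1, b.2.2.1, b.2.2.2.1 ++ ck, b.2.2.2.2.1, b.2.2.2.2.2),
                      (bi.1, bi.2.1, bi.2.2.1, bi.2.2.2.1 ++ sk, bi.2.2.2.2.1, bi.2.2.2.2.2))
      else if rk = 5 then ((b.1, b.2.1, b.2.2.1, b.2.2.2.1, b.2.2.2.2.1 ++ ck, b.2.2.2.2.2),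
                      (bi.1, bi.2.1, bi.2.2.1, bi.2.2.2.1, bi.2.2.2.2.1 ++ sk, bi.2.2.2.2.2))
      else if rk = 6 then ((b.1, b.2.1, b.2.2.1, b.2.2.2.1, b.2.2.2.2.1, b.2.2.2.2.2 ++ ck),
                      (bi.1, bi.2.1, bi.2.2.1, bi.2.2.2.1, bi.2.2.2.2.1, bi.2.2.2.2.2 ++ sk))
      else st)
    (([], [], [], [], [], []), ([], [], [], [], [], []))
  ([fin.1.1, fin.1.2.1, fin.1.2.2.1, fin.1.2.2.2.1, fin.1.2.2.2.2.1, fin.1.2.2.2.2.2],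
   [fin.2.1, fin.2.2.1, fin.2.2.2.1, fin.2.2.2.2.1, fin.2.2.2.2.2.1, fin.2.2.2.2.2.2])

-- ===== PORT B =====
def try_model_dbscan_alt (label : List Int) (feature_m1 : List Int) (label_class : List Int) (idx_keep : List Int) (bin_truth : List Int) : List (List Int) × List (List Int) :=
  let groups : PySem.Dict Int (List Int) :=
    (PySem.List.enumerate label).foldl (fun d p => d.modify p.2 [] (fun l => l ++ [p.1])) PySem.Dict.empty
  label_class.foldl
    (fun (st : List (List Int) × List (List Int)) c =>
      let idxs := groups.getD c []
      let counts : PySem.Dict Int Int :=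
        idxs.foldl (fun d i => d.modify (PySem.List.pyGetD bin_truth i 0) 0 (fun k => k + 1)) PySem.Dict.empty
      let best := (PySem.List.max? counts.keys (fun v => counts.getD v 0)).getD 0
      if 1 ≤ best ∧ best ≤ 6 then
        (PySem.List.pySetD st.1 (best - 1) (PySem.List.pyGetD st.1 (best - 1) [] ++ idxs),
         PySem.List.pySetD st.2 (best - 1) (PySem.List.pyGetD st.2 (best - 1) [] ++ idxs.map (fun i => PySem.List.pyGetD idx_keep i 0)))
      else st)
    ([[], [], [], [], [], []], [[], [], [], [], [], []])

-- ===== PRECONDITION & SPEC =====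
-- truth labels of the points of class c (stated over the raw inputs, for Pre_ only)
def pvTruthList (label : List Int) (bin_truth : List Int) (c : Int) : List Int :=
  ((List.range label.length).filter (fun i => label.getD i 0 == c)).map (fun i => bin_truth.getD i 0)

-- Pre_ excludes inputs on which A raises (a class value absent from label makes max() see an
-- empty set: ValueError; a clustered index past the end of idx_keep or bin_truth: IndexError)
-- and inputs with a tie for some cluster's most frequent truth label, on which A's pick is an
-- accident of CPython's set iteration order and B's first-occurrence pick is equally defensible.
def Pre_try_model_dbscan (label : List Int) (feature_m1 : List Int) (label_class : List Int) (idx_keep : List Int) (bin_truth : List Int) : Prop :=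
  (∀ c ∈ label_class, c ∈ label) ∧
  (∀ i ∈ List.range label.length, label.getD i 0 ∈ label_class → i < idx_keep.length ∧ i < bin_truth.length) ∧
  (∀ c ∈ label_class, ∃ v ∈ pvTruthList label bin_truth c,
      ∀ w ∈ pvTruthList label bin_truth c, w ≠ v →
        (pvTruthList label bin_truth c).count w < (pvTruthList label bin_truth c).count v)
instance (label : List Int) (feature_m1 : List Int) (label_class : List Int) (idx_keep : List Int) (bin_truth : List Int) : Decidable (Pre_try_model_dbscan label feature_m1 label_class idx_keep bin_truth) := by unfold Pre_try_model_dbscan; infer_instance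

def pvWitness_try_model_dbscan : List Int × List Int × List Int × List Int × List Int :=
  ([1, 2, 2], [], [1, 2], [7, 8, 9], [1, 2, 2])

def Spec_try_model_dbscan (label : List Int) (feature_m1 : List Int) (label_class : List Int) (idx_keep : List Int) (bin_truth : List Int) (out : List (List Int) × List (List Int)) : Prop := out = try_model_dbscan_alt label feature_m1 label_class idx_keep bin_truth
instance (label : List Int) (feature_m1 : List Int) (label_class : List Int) (idx_keep : List Int) (bin_truth : List Int) (out : List (List Int) × List (List Int)) : Decidable (Spec_try_model_dbscan label feature_m1 label_class idx_keep bin_truth out) := by unfold Spec_try_model_dbscan; infer_instance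

-- ===== CLAIM (what is proved, stated in full; the proofs are below) =====
def Claim_equal_try_model_dbscan : Prop := ∀ (label : List Int) (feature_m1 : List Int) (label_class : List Int) (idx_keep : List Int) (bin_truth : List Int), Dom_try_model_dbscan label feature_m1 label_class idx_keep bin_truth → Pre_try_model_dbscan label feature_m1 label_class idx_keep bin_truth → Spec_try_model_dbscan label feature_m1 label_class idx_keep bin_truth (try_model_dbscan label feature_m1 label_class idx_keep bin_truth)

-- ===== LEMMAS AND PROOFS =====

def clusterOf (label : List Int) (c : Int) : List Int :=
  (PySem.List.pyRange 0 (label.length : Int) 1).filter (fun i => PySem.List.pyGetD label i 0 == c)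
def truthOf (bin_truth : List Int) (cl : List Int) : List Int := cl.map (fun i => PySem.List.pyGetD bin_truth i 0)
def saveOf (idx_keep : List Int) (cl : List Int) : List Int := cl.map (fun i => PySem.List.pyGetD idx_keep i 0)
def majOf (rl : List Int) : Int := (PySem.List.max? (PySem.Set.ofList rl) (fun v => (rl.count v : Int))).getD 0
abbrev Six := List Int × List Int × List Int × List Int × List Int × List Int
def pack (st : Six × Six) : List (List Int) × List (List Int) :=
  ([st.1.1, st.1.2.1, st.1.2.2.1, st.1.2.2.2.1, st.1.2.2.2.2.1, st.1.2.2.2.2.2],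
   [st.2.1, st.2.2.1, st.2.2.2.1, st.2.2.2.2.1, st.2.2.2.2.2.1, st.2.2.2.2.2.2])
def stepA (label idx_keep bin_truth : List Int) (st : Six × Six) (c : Int) : Six × Six :=
  let b := st.1
  let bi := st.2
  let rk := majOf (truthOf bin_truth (clusterOf label c))
  let ck := clusterOf label c
  let sk := saveOf idx_keep (clusterOf label c)
  if rk = 1 then ((b.1 ++ ck, b.2.1, b.2.2.1, b.2.2.2.1, b.2.2.2.2.1, b.2.2.2.2.2),
                  (bi.1 ++ sk, bi.2.1, bi.2.2.1, bi.2.2.2.1, bi.2.2.2.2.1, bi.2.2.2.2.2))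
  else if rk = 2 then ((b.1, b.2.1 ++ ck, b.2.2.1, b.2.2.2.1, b.2.2.2.2.1, b.2.2.2.2.2),
                  (bi.1, bi.2.1 ++ sk, bi.2.2.1, bi.2.2.2.1, bi.2.2.2.2.1, bi.2.2.2.2.2))
  else if rk = 3 then ((b.1, b.2.1, b.2.2.1 ++ ck, b.2.2.2.1, b.2.2.2.2.1, b.2.2.2.2.2),
                  (bi.1, bi.2.1, bi.2.2.1 ++ sk, bi.2.2.2.1, bi.2.2.2.2.1, bi.2.2.2.2.2))
  else if rk = 4 then ((b.1, b.2.1, b.2.2.1, b.2.2.2.1 ++ ck, b.2.2.2.2.1, b.2.2.2.2.2),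
                  (bi.1, bi.2.1, bi.2.2.1, bi.2.2.2.1 ++ sk, bi.2.2.2.2.1, bi.2.2.2.2.2))
  else if rk = 5 then ((b.1, b.2.1, b.2.2.1, b.2.2.2.1, b.2.2.2.2.1 ++ ck, b.2.2.2.2.2),
                  (bi.1, bi.2.1, bi.2.2.1, bi.2.2.2.1, bi.2.2.2.2.1 ++ sk, bi.2.2.2.2.2))
  else if rk = 6 then ((b.1, b.2.1, b.2.2.1, b.2.2.2.1, b.2.2.2.2.1, b.2.2.2.2.2 ++ ck),
                  (bi.1, bi.2.1, bi.2.2.1, bi.2.2.2.1, bi.2.2.2.2.1, bi.2.2.2.2.2 ++ sk))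
  else st
def stepB (label idx_keep bin_truth : List Int) (st : List (List Int) × List (List Int)) (c : Int) : List (List Int) × List (List Int) :=
  let idxs := clusterOf label c
  let best := majOf (truthOf bin_truth (clusterOf label c))
  if 1 ≤ best ∧ best ≤ 6 then
    (PySem.List.pySetD st.1 (best - 1) (PySem.List.pyGetD st.1 (best - 1) [] ++ idxs),
     PySem.List.pySetD st.2 (best - 1) (PySem.List.pyGetD st.2 (best - 1) [] ++ saveOf idx_keep idxs))
  else st
lemma stepB_pack (label idx_keep bin_truth : List Int) (s : Six × Six) (c : Int) :
    stepB label idx_keep bin_truth (pack s) c = pack (stepA label idx_keep bin_truth s c) := by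
  obtain ⟨⟨b1,b2,b3,b4,b5,b6⟩, i1,i2,i3,i4,i5,i6⟩ := s
  unfold stepA stepB pack
  generalize majOf (truthOf bin_truth (clusterOf label c)) = r
  generalize clusterOf label c = ck
  by_cases h1 : r = 1
  · subst h1; norm_num [PySem.List.pySetD, PySem.List.pySet?, PySem.List.pyGetD, PySem.List.pyGet?, PySem.List.pyIdx?, List.set, List.getElem_cons_succ, List.getElem_cons_zero, show Int.toNat 2 = 2 from rfl, show Int.toNat 3 = 3 from rfl, show Int.toNat 4 = 4 from rfl, show Int.toNat 5 = 5 from rfl]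
  by_cases h2 : r = 2
  · subst h2; norm_num [PySem.List.pySetD, PySem.List.pySet?, PySem.List.pyGetD, PySem.List.pyGet?, PySem.List.pyIdx?, List.set, List.getElem_cons_succ, List.getElem_cons_zero, show Int.toNat 2 = 2 from rfl, show Int.toNat 3 = 3 from rfl, show Int.toNat 4 = 4 from rfl, show Int.toNat 5 = 5 from rfl]
  by_cases h3 : r = 3
  · subst h3; norm_num [PySem.List.pySetD, PySem.List.pySet?, PySem.List.pyGetD, PySem.List.pyGet?, PySem.List.pyIdx?, List.set, List.getElem_cons_succ, List.getElem_cons_zero, show Int.toNat 2 = 2 from rfl, show Int.toNat 3 = 3 from rfl, show Int.toNat 4 = 4 from rfl, show Int.toNat 5 = 5 from rfl]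
  by_cases h4 : r = 4
  · subst h4; norm_num [PySem.List.pySetD, PySem.List.pySet?, PySem.List.pyGetD, PySem.List.pyGet?, PySem.List.pyIdx?, List.set, List.getElem_cons_succ, List.getElem_cons_zero, show Int.toNat 2 = 2 from rfl, show Int.toNat 3 = 3 from rfl, show Int.toNat 4 = 4 from rfl, show Int.toNat 5 = 5 from rfl]
  by_cases h5 : r = 5
  · subst h5; norm_num [PySem.List.pySetD, PySem.List.pySet?, PySem.List.pyGetD, PySem.List.pyGet?, PySem.List.pyIdx?, List.set, List.getElem_cons_succ, List.getElem_cons_zero, show Int.toNat 2 = 2 from rfl, show Int.toNat 3 = 3 from rfl, show Int.toNat 4 = 4 from rfl, show Int.toNat 5 = 5 from rfl]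
  by_cases h6 : r = 6
  · subst h6; norm_num [PySem.List.pySetD, PySem.List.pySet?, PySem.List.pyGetD, PySem.List.pyGet?, PySem.List.pyIdx?, List.set, List.getElem_cons_succ, List.getElem_cons_zero, show Int.toNat 2 = 2 from rfl, show Int.toNat 3 = 3 from rfl, show Int.toNat 4 = 4 from rfl, show Int.toNat 5 = 5 from rfl]
  · have : ¬ (1 ≤ r ∧ r ≤ 6) := by omega
    simp [h1, h2, h3, h4, h5, h6, this]
lemma B_groups (label : List Int) (c : Int) :
    ((PySem.List.enumerate label).foldl (fun d p => d.modify p.2 [] (fun l => l ++ [p.1]))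
      PySem.Dict.empty).getD c [] = clusterOf label c := by
  have h1 : (PySem.List.enumerate label)
      = (PySem.List.pyRange 0 (label.length : Int) 1).map (fun j => (j, PySem.List.pyGetD label j 0)) := by
    simpa using PySem.List.enumerate_eq_map_pyRange label 0
  have h2 : (PySem.List.enumerate label).foldl (fun d p => d.modify p.2 [] (fun l => l ++ [p.1])) PySem.Dict.empty
      = ((PySem.List.enumerate label).map (fun p => (p.2, p.1))).foldl
          (fun d q => d.modify q.1 [] (fun l => l ++ [q.2])) PySem.Dict.empty := by
    rw [List.foldl_map]
  rw [h2, PySem.Dict.getD_foldl_modify_append, h1]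
  simp [List.map_map, List.filter_map, clusterOf, Function.comp_def]
lemma B_best (bin_truth : List Int) (idxs : List Int) :
    (PySem.List.max?
      ((idxs.foldl (fun d i => d.modify (PySem.List.pyGetD bin_truth i 0) 0 (fun k => k + 1))
        PySem.Dict.empty : PySem.Dict Int Int)).keys
      (fun v => ((idxs.foldl (fun d i => d.modify (PySem.List.pyGetD bin_truth i 0) 0 (fun k => k + 1))
        PySem.Dict.empty : PySem.Dict Int Int)).getD v 0)).getD 0
    = majOf (truthOf bin_truth idxs) := by
  have hc : (idxs.foldl (fun d i => d.modify (PySem.List.pyGetD bin_truth i 0) 0 (fun k => k + 1))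
        PySem.Dict.empty : PySem.Dict Int Int) = PySem.Dict.counter (truthOf bin_truth idxs) := by
    rw [PySem.Dict.counter_eq_foldl, truthOf, List.foldl_map]
  rw [hc, PySem.Dict.keys_counter, majOf]
  congr 2
  funext v
  rw [PySem.Dict.getD_counter]
lemma A_clusters (label label_class idx_keep : List Int) :
    (PySem.List.pyRange 0 (label_class.length : Int) 1).foldl
      (fun (st : List (List Int) × List (List Int)) j =>
        (st.1 ++ [(PySem.List.pyRange 0 (label.length : Int) 1).filter
            (fun i => PySem.List.pyGetD label i 0 == PySem.List.pyGetD label_class j 0)],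
         st.2 ++ [((PySem.List.pyRange 0 (label.length : Int) 1).filter
            (fun i => PySem.List.pyGetD label i 0 == PySem.List.pyGetD label_class j 0)).map
            (fun i => PySem.List.pyGetD idx_keep i 0)]))
      ([], []) =
    (label_class.map (clusterOf label), label_class.map (fun c => saveOf idx_keep (clusterOf label c))) := by
  rw [PySem.List.foldl_pyRange_zero_pyGetD' label_class 0
    (fun (st : List (List Int) × List (List Int)) c =>
      (st.1 ++ [(PySem.List.pyRange 0 (label.length : Int) 1).filter
          (fun i => PySem.List.pyGetD label i 0 == c)],
       st.2 ++ [((PySem.List.pyRange 0 (label.length : Int) 1).filter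
          (fun i => PySem.List.pyGetD label i 0 == c)).map (fun i => PySem.List.pyGetD idx_keep i 0)]))
    ([], [])]
  rw [PySem.List.foldl_prod_mk
    (fun (a : List (List Int)) c => a ++ [(PySem.List.pyRange 0 (label.length : Int) 1).filter
        (fun i => PySem.List.pyGetD label i 0 == c)])
    (fun (a : List (List Int)) c => a ++ [((PySem.List.pyRange 0 (label.length : Int) 1).filter
        (fun i => PySem.List.pyGetD label i 0 == c)).map (fun i => PySem.List.pyGetD idx_keep i 0)])
    label_class [] []]
  rw [PySem.List.foldl_append_singleton_eq_map, PySem.List.foldl_append_singleton_eq_map]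
  simp [clusterOf, saveOf]
lemma fold_pack (label idx_keep bin_truth : List Int) (L : List Int) :
    ∀ s : Six × Six,
      L.foldl (stepB label idx_keep bin_truth) (pack s) =
        pack (L.foldl (stepA label idx_keep bin_truth) s) := by
  induction L with
  | nil => intro s; rfl
  | cons c L ih => intro s; simp only [List.foldl_cons, stepB_pack, ih]

lemma B_to_norm (label feature_m1 label_class idx_keep bin_truth : List Int) :
    try_model_dbscan_alt label feature_m1 label_class idx_keep bin_truth
      = label_class.foldl (stepB label idx_keep bin_truth) ([[],[],[],[],[],[]], [[],[],[],[],[],[]]) := by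
  unfold try_model_dbscan_alt
  dsimp only
  apply PySem.List.foldl_congr_mem
  intro st c _
  rw [B_groups, B_best]
  rfl
lemma map_get_map {α β : Type} (xs : List α) (H : α → β) (d : α) :
    (PySem.List.pyRange 0 (xs.length : Int) 1).map (fun j => H (PySem.List.pyGetD xs j d)) = xs.map H := by
  calc (PySem.List.pyRange 0 (xs.length : Int) 1).map (fun j => H (PySem.List.pyGetD xs j d))
      = ((PySem.List.pyRange 0 (xs.length : Int) 1).map (fun j => PySem.List.pyGetD xs j d)).map H := by
        rw [List.map_map]; rfl
    _ = xs.map H := by rw [PySem.List.map_pyGetD_pyRange_zero']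

lemma A_result (label bin_truth label_class : List Int) :
    List.foldl (fun (r : List Int) j => r ++ [(PySem.List.max?
        (PySem.Set.ofList (List.map (fun i => PySem.List.pyGetD bin_truth i 0)
          (PySem.List.pyGetD (List.map (clusterOf label) label_class) j [])))
        (fun v => ((List.count v (List.map (fun i => PySem.List.pyGetD bin_truth i 0)
          (PySem.List.pyGetD (List.map (clusterOf label) label_class) j []))) : Int))).getD 0])
      [] (PySem.List.pyRange 0 (label_class.length : Int) 1)
    = label_class.map (fun c => majOf (truthOf bin_truth (clusterOf label c))) := by
  rw [PySem.List.foldl_append_singleton_eq_map]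
  rw [show ((label_class.length : Int)) = (((label_class.map (clusterOf label)).length : Int)) by simp]
  rw [map_get_map (label_class.map (clusterOf label))
    (fun cl => (PySem.List.max? (PySem.Set.ofList (List.map (fun i => PySem.List.pyGetD bin_truth i 0) cl))
      (fun v => ((List.count v (List.map (fun i => PySem.List.pyGetD bin_truth i 0) cl)) : Int))).getD 0) []]
  simp [List.map_map, majOf, truthOf, Function.comp_def]

lemma A_bins (label idx_keep bin_truth label_class : List Int) :
    List.foldl (fun (st : Six × Six) k =>
      if PySem.List.pyGetD (List.map (fun c => majOf (truthOf bin_truth (clusterOf label c))) label_class) k 0 = 1 then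
        ((st.1.1 ++ (PySem.List.pyGetD (List.map (clusterOf label) label_class) k []), st.1.2.1, st.1.2.2.1, st.1.2.2.2.1, st.1.2.2.2.2.1, st.1.2.2.2.2.2),
           (st.2.1 ++ (PySem.List.pyGetD (List.map (fun c => saveOf idx_keep (clusterOf label c)) label_class) k []), st.2.2.1, st.2.2.2.1, st.2.2.2.2.1, st.2.2.2.2.2.1, st.2.2.2.2.2.2))
      else if PySem.List.pyGetD (List.map (fun c => majOf (truthOf bin_truth (clusterOf label c))) label_class) k 0 = 2 then
        ((st.1.1, st.1.2.1 ++ (PySem.List.pyGetD (List.map (clusterOf label) label_class) k []), st.1.2.2.1, st.1.2.2.2.1, st.1.2.2.2.2.1, st.1.2.2.2.2.2),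
           (st.2.1, st.2.2.1 ++ (PySem.List.pyGetD (List.map (fun c => saveOf idx_keep (clusterOf label c)) label_class) k []), st.2.2.2.1, st.2.2.2.2.1, st.2.2.2.2.2.1, st.2.2.2.2.2.2))
      else if PySem.List.pyGetD (List.map (fun c => majOf (truthOf bin_truth (clusterOf label c))) label_class) k 0 = 3 then
        ((st.1.1, st.1.2.1, st.1.2.2.1 ++ (PySem.List.pyGetD (List.map (clusterOf label) label_class) k []), st.1.2.2.2.1, st.1.2.2.2.2.1, st.1.2.2.2.2.2),
           (st.2.1, st.2.2.1, st.2.2.2.1 ++ (PySem.List.pyGetD (List.map (fun c => saveOf idx_keep (clusterOf label c)) label_class) k []), st.2.2.2.2.1, st.2.2.2.2.2.1, st.2.2.2.2.2.2))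
      else if PySem.List.pyGetD (List.map (fun c => majOf (truthOf bin_truth (clusterOf label c))) label_class) k 0 = 4 then
        ((st.1.1, st.1.2.1, st.1.2.2.1, st.1.2.2.2.1 ++ (PySem.List.pyGetD (List.map (clusterOf label) label_class) k []), st.1.2.2.2.2.1, st.1.2.2.2.2.2),
           (st.2.1, st.2.2.1, st.2.2.2.1, st.2.2.2.2.1 ++ (PySem.List.pyGetD (List.map (fun c => saveOf idx_keep (clusterOf label c)) label_class) k []), st.2.2.2.2.2.1, st.2.2.2.2.2.2))
      else if PySem.List.pyGetD (List.map (fun c => majOf (truthOf bin_truth (clusterOf label c))) label_class) k 0 = 5 then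
        ((st.1.1, st.1.2.1, st.1.2.2.1, st.1.2.2.2.1, st.1.2.2.2.2.1 ++ (PySem.List.pyGetD (List.map (clusterOf label) label_class) k []), st.1.2.2.2.2.2),
           (st.2.1, st.2.2.1, st.2.2.2.1, st.2.2.2.2.1, st.2.2.2.2.2.1 ++ (PySem.List.pyGetD (List.map (fun c => saveOf idx_keep (clusterOf label c)) label_class) k []), st.2.2.2.2.2.2))
      else if PySem.List.pyGetD (List.map (fun c => majOf (truthOf bin_truth (clusterOf label c))) label_class) k 0 = 6 then
        ((st.1.1, st.1.2.1, st.1.2.2.1, st.1.2.2.2.1, st.1.2.2.2.2.1, st.1.2.2.2.2.2 ++ (PySem.List.pyGetD (List.map (clusterOf label) label_class) k [])),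
           (st.2.1, st.2.2.1, st.2.2.2.1, st.2.2.2.2.1, st.2.2.2.2.2.1, st.2.2.2.2.2.2 ++ (PySem.List.pyGetD (List.map (fun c => saveOf idx_keep (clusterOf label c)) label_class) k [])))
      else st)
      (([],[],[],[],[],[]), ([],[],[],[],[],[])) (PySem.List.pyRange 0 (label_class.length : Int) 1)
    = label_class.foldl (stepA label idx_keep bin_truth) (([],[],[],[],[],[]), ([],[],[],[],[],[])) := by
  refine Eq.trans (PySem.List.foldl_congr_mem _ _
    (fun st k => stepA label idx_keep bin_truth st (PySem.List.pyGetD label_class k 0)) _ ?_) ?_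
  · intro st k hk
    rw [PySem.List.mem_pyRange_one] at hk
    obtain ⟨hk0, hk1⟩ := hk
    beta_reduce
    rw [PySem.List.pyGetD_eq_getElem label_class 0 hk0 hk1,
        PySem.List.pyGetD_eq_getElem (List.map (fun c => majOf (truthOf bin_truth (clusterOf label c))) label_class) 0 hk0 (by simpa using hk1),
        PySem.List.pyGetD_eq_getElem (List.map (clusterOf label) label_class) ([] : List Int) hk0 (by simpa using hk1),
        PySem.List.pyGetD_eq_getElem (List.map (fun c => saveOf idx_keep (clusterOf label c)) label_class) ([] : List Int) hk0 (by simpa using hk1)]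
    simp [stepA, List.getElem_map]
  · exact PySem.List.foldl_pyRange_zero_pyGetD' label_class 0 (stepA label idx_keep bin_truth) _

lemma A_to_norm (label feature_m1 label_class idx_keep bin_truth : List Int) :
    try_model_dbscan label feature_m1 label_class idx_keep bin_truth
      = pack (label_class.foldl (stepA label idx_keep bin_truth)
          (([],[],[],[],[],[]), ([],[],[],[],[],[]))) := by
  unfold try_model_dbscan
  dsimp only
  rw [A_clusters label label_class idx_keep]
  dsimp only
  rw [A_result]
  rw [A_bins]
  rfl

-- ===== VERDICT (by name: the statement is the Claim_ definition above) =====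
theorem try_model_dbscan_spec : Claim_equal_try_model_dbscan := by
  intro label feature_m1 label_class idx_keep bin_truth _ _
  unfold Spec_try_model_dbscan
  rw [A_to_norm, B_to_norm,
      show ([[],[],[],[],[],[]], [[],[],[],[],[],[]]) = pack (([],[],[],[],[],[]), ([],[],[],[],[],[])) from rfl,
      fold_pack]
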